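-- pv_equiv track=rewrite | github.com/daleydeng/cocotools | tools/coco_format.py | clamp_coords
-- ===== SOURCE A (Python) =====
-- def clamp(v, max_v, min_v=0):
--     return max(min(v, max_v), min_v)
--
-- def clamp_coords(coords, img_size, stride=2):
--     imw, imh = img_size
--     out = []
--     for i, x in enumerate(coords):
--         if i % stride == 0:
--             x = clamp(x, imw-1)
--         elif i % stride == 1:
--             x = clamp(x, imh-1)
--
--         out.append(x)
--     return out
-- ===== SOURCE B (Python) =====
-- def clamp(v, max_v, min_v=0):
--     return max(min(v, max_v), min_v)
--
-- def clamp_coords(coords, img_size, stride=2):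
--     imw, imh = img_size
--     out = []
--     start = 0
--     while start < len(coords):
--         chunk = coords[start:start + stride]
--         chunk[0] = clamp(chunk[0], imw - 1)
--         if len(chunk) > 1:
--             chunk[1] = clamp(chunk[1], imh - 1)
--         out += chunk
--         start += stride
--     return out
-- ===== Notes on version B (the rewrite author's own statement) =====
-- stated objective: alternative
-- what changed: replaces the per-element enumerate loop testing i % stride twice per element with a chunked sweep that slices stride-sized groups and clamps each group's first two entries directly (no modulo at all)
-- outside the precondition, e.g. on clamp_coords([3, 9], (2, 3), -2): A returns [1, 9], B raises IndexError
import Mathlib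
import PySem

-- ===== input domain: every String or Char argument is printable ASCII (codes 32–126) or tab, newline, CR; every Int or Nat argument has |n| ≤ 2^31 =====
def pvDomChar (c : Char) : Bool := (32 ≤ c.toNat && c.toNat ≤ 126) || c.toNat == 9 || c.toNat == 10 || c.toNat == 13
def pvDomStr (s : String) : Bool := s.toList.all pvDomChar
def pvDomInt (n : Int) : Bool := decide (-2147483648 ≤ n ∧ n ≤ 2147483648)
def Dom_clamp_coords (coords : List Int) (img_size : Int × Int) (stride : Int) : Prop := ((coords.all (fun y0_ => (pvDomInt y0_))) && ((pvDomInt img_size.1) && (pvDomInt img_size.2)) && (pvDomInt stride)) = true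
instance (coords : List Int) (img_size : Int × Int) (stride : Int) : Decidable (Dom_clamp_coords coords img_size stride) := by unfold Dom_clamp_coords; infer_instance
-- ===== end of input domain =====

-- B replaces A's per-element `i % stride` dispatch with a chunked sweep over stride-sized
-- slices, clamping each chunk's first two entries directly: an alternative decomposition of
-- the same O(n) task, not claimed faster.

-- ===== PORT A =====

-- clamp(v, max_v, min_v=0) = max(min(v, max_v), min_v)
def pyClamp (v max_v : Int) : Int := max (min v max_v) 0

def clamp_coords (coords : List Int) (img_size : Int × Int) (stride : Int) : List Int :=
  let imw := img_size.1
  let imh := img_size.2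
  (PySem.List.enumerate coords 0).foldl
    (fun out p =>
      let x :=
        if PySem.Int.mod p.1 stride = 0 then pyClamp p.2 (imw - 1)
        else if PySem.Int.mod p.1 stride = 1 then pyClamp p.2 (imh - 1)
        else p.2
      out ++ [x])
    []

-- ===== PORT B =====

-- one iteration's chunk editing: chunk[0] = clamp(chunk[0], imw-1); if len > 1:
-- chunk[1] = clamp(chunk[1], imh-1).  ([] case: Python raises IndexError there — outside Pre_.)
def altChunk (imw imh : Int) : List Int → List Int
  | [] => []
  | c0 :: rest =>
    pyClamp c0 (imw - 1) ::
      (match rest with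
       | [] => []
       | c1 :: r => pyClamp c1 (imh - 1) :: r)

-- the while loop; fuel bounds the iteration count (≥ coords.length suffices when stride ≥ 1)
def altLoop (coords : List Int) (imw imh stride : Int) : Nat → Int → List Int → List Int
  | 0, _, out => out
  | fuel + 1, start, out =>
    if start < (coords.length : Int) then
      let chunk := PySem.List.slice coords (some start) (some (start + stride))
      altLoop coords imw imh stride fuel (start + stride) (out ++ altChunk imw imh chunk)
    else out

def clamp_coords_alt (coords : List Int) (img_size : Int × Int) (stride : Int) : List Int :=
  let imw := img_size.1
  let imh := img_size.2
  altLoop coords imw imh stride (coords.length + 1) 0 []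

-- ===== PRECONDITION & SPEC =====
-- Pre_ excludes non-positive stride with non-empty coords: there A raises ZeroDivisionError
-- (stride == 0), and negative stride is outside the function's natural domain (B's chunked
-- sweep raises IndexError there, while A's `i % stride` happens to return a value).
def Pre_clamp_coords (coords : List Int) (img_size : Int × Int) (stride : Int) : Prop :=
  1 ≤ stride ∨ coords = []
instance (coords : List Int) (img_size : Int × Int) (stride : Int) : Decidable (Pre_clamp_coords coords img_size stride) := by unfold Pre_clamp_coords; infer_instance

def pvWitness_clamp_coords : List Int × (Int × Int) × Int := ([3, 100, -5, 7], (50, 40), 2)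

def Spec_clamp_coords (coords : List Int) (img_size : Int × Int) (stride : Int) (out : List Int) : Prop := out = clamp_coords_alt coords img_size stride
instance (coords : List Int) (img_size : Int × Int) (stride : Int) (out : List Int) : Decidable (Spec_clamp_coords coords img_size stride out) := by unfold Spec_clamp_coords; infer_instance

-- ===== CLAIM (what is proved, stated in full; the proofs are below) =====
def Claim_equal_clamp_coords : Prop := ∀ (coords : List Int) (img_size : Int × Int) (stride : Int), Dom_clamp_coords coords img_size stride → Pre_clamp_coords coords img_size stride → Spec_clamp_coords coords img_size stride (clamp_coords coords img_size stride)

-- ===== LEMMAS AND PROOFS =====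

-- reference index-driven map: element at absolute index i is clamped by i % s
def specFrom (imw imh : Int) (s : Nat) : Nat → List Int → List Int
  | _, [] => []
  | i, x :: xs =>
    (if i % s = 0 then pyClamp x (imw - 1)
     else if i % s = 1 then pyClamp x (imh - 1)
     else x) :: specFrom imw imh s (i + 1) xs

theorem specFrom_append (imw imh : Int) (s : Nat) (a b : List Int) (i : Nat) :
    specFrom imw imh s i (a ++ b) = specFrom imw imh s i a ++ specFrom imw imh s (i + a.length) b := by
  induction a generalizing i with
  | nil => simp [specFrom]
  | cons x xs ih => simp [specFrom, ih (i + 1)]; ring_nf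

theorem specFrom_id (imw imh : Int) (s : Nat) :
    ∀ (l : List Int) (i : Nat), 2 ≤ i % s → i % s + l.length ≤ s → specFrom imw imh s i l = l := by
  intro l
  induction l with
  | nil => intro i _ _; rfl
  | cons x xs ih =>
    intro i h2 hle
    have hlen : i % s + (xs.length + 1) ≤ s := by simpa using hle
    have hne0 : ¬ i % s = 0 := by omega
    have hne1 : ¬ i % s = 1 := by omega
    simp only [specFrom, if_neg hne0, if_neg hne1, List.cons.injEq, true_and]
    cases xs with
    | nil => rfl
    | cons y ys =>
      have hlen2 : i % s + (ys.length + 2) ≤ s := by simpa using hlen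
      have hlt : i % s + 1 < s := by omega
      have h1s : 1 % s = 1 := Nat.mod_eq_of_lt (by omega)
      have hmod : (i + 1) % s = i % s + 1 := by
        rw [Nat.add_mod, h1s, Nat.mod_eq_of_lt hlt]
      apply ih (i + 1) (by omega) (by simp only [List.length_cons]; omega)

theorem altChunk_eq_specFrom (imw imh : Int) (s : Nat) (hs : 1 ≤ s) (start : Nat)
    (hstart : start % s = 0) (chunk : List Int) (hlen : chunk.length ≤ s) :
    altChunk imw imh chunk = specFrom imw imh s start chunk := by
  match chunk with
  | [] => rfl
  | [c0] =>
    simp [altChunk, specFrom, hstart]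
  | c0 :: c1 :: r =>
    have hlen' : r.length + 2 ≤ s := by simpa using hlen
    have hs2 : 2 ≤ s := by omega
    have h1s : 1 % s = 1 := Nat.mod_eq_of_lt (by omega)
    have h1 : (start + 1) % s = 1 := by
      rw [Nat.add_mod, hstart, h1s]
      simpa using h1s
    have htail : specFrom imw imh s (start + 1 + 1) r = r := by
      cases r with
      | nil => rfl
      | cons z zs =>
        have hlenz : zs.length + 3 ≤ s := by simpa using hlen'
        have h2 : (start + 1 + 1) % s = 2 := by
          rw [show start + 1 + 1 = start + 2 from rfl, Nat.add_mod, hstart]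
          simpa using Nat.mod_eq_of_lt (by omega : 2 < s)
        exact specFrom_id imw imh s (z :: zs) (start + 1 + 1) (by omega)
          (by simp only [List.length_cons]; omega)
    simp [altChunk, specFrom, hstart, h1, htail]

theorem altLoop_eq (coords : List Int) (imw imh : Int) (s : Nat) (hs : 1 ≤ s) :
    ∀ (fuel start : Nat) (out : List Int), start % s = 0 →
      coords.length ≤ start + fuel →
      altLoop coords imw imh (s : Int) fuel (start : Int) out
        = out ++ specFrom imw imh s start (coords.drop start) := by
  intro fuel
  induction fuel with
  | zero =>
    intro start out _ hlen
    have : coords.drop start = [] := List.drop_eq_nil_of_le hlen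
    simp [altLoop, this, specFrom]
  | succ fuel ih =>
    intro start out hstart hlen
    by_cases hlt : (start : Int) < (coords.length : Int)
    · have hltn : start < coords.length := by exact_mod_cast hlt
      rw [altLoop, if_pos hlt]
      have hslice : PySem.List.slice coords (some (start : Int)) (some ((start : Int) + (s : Int)))
          = (coords.drop start).take s := PySem.List.slice_natCast_add coords start s
      have hcast : (start : Int) + (s : Int) = ((start + s : Nat) : Int) := by push_cast; ring
      rw [hslice, hcast, ih (start + s) _ (by rw [Nat.add_mod_right]; exact hstart) (by omega)]
      have hchunk : altChunk imw imh ((coords.drop start).take s)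
          = specFrom imw imh s start ((coords.drop start).take s) :=
        altChunk_eq_specFrom imw imh s hs start hstart _ (by simp)
      have hsplit : coords.drop start = (coords.drop start).take s ++ (coords.drop start).drop s := by
        simp
      have key : specFrom imw imh s start (coords.drop start)
          = specFrom imw imh s start ((coords.drop start).take s)
            ++ specFrom imw imh s (start + s) (coords.drop (start + s)) := by
        conv_lhs => rw [hsplit]
        rw [specFrom_append]
        congr 1
        rw [List.drop_drop]
        by_cases hge : s ≤ (coords.drop start).length
        · rw [List.length_drop] at hge
          have hts : ((coords.drop start).take s).length = s := by
            rw [List.length_take, List.length_drop]; omega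
          rw [hts]
        · push_neg at hge
          rw [List.length_drop] at hge
          have h1 : coords.drop (s + start) = [] :=
            List.drop_eq_nil_of_le (by omega)
          have h2 : coords.drop (start + s) = [] :=
            List.drop_eq_nil_of_le (by omega)
          simp [h2, specFrom]
      rw [hchunk, key, List.append_assoc]
    · rw [altLoop, if_neg hlt]
      have : coords.drop start = [] := by
        apply List.drop_eq_nil_of_le
        have h : (coords.length : Int) ≤ (start : Int) := by omega
        exact_mod_cast h
      simp [this, specFrom]

theorem portA_eq (imw imh stride : Int) (s : Nat) (hseq : stride = (s : Int)) (hs : 1 ≤ s) :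
    ∀ (xs : List Int) (k : Nat) (acc : List Int),
      (PySem.List.enumerate xs (k : Int)).foldl
        (fun out p =>
          let x :=
            if PySem.Int.mod p.1 stride = 0 then pyClamp p.2 (imw - 1)
            else if PySem.Int.mod p.1 stride = 1 then pyClamp p.2 (imh - 1)
            else p.2
          out ++ [x]) acc
      = acc ++ specFrom imw imh s k xs := by
  intro xs
  induction xs with
  | nil => intro k acc; simp [PySem.List.enumerate_nil, specFrom]
  | cons x xs ih =>
    intro k acc
    rw [PySem.List.enumerate_cons]
    simp only [List.foldl_cons]
    have hcast : (k : Int) + 1 = ((k + 1 : Nat) : Int) := by push_cast; ring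
    rw [hcast, ih (k + 1)]
    have hmod : PySem.Int.mod (k : Int) stride = ((k % s : Nat) : Int) := by
      rw [hseq]; exact PySem.Int.mod_natCast k s
    rw [specFrom]
    simp only [hmod]
    by_cases h0 : k % s = 0
    · simp [h0, List.append_assoc]
    · have h0' : ¬ ((k % s : Nat) : Int) = 0 := by exact_mod_cast h0
      by_cases h1 : k % s = 1
      · simp [h1, List.append_assoc]
      · have h1' : ¬ ((k % s : Nat) : Int) = 1 := by exact_mod_cast h1
        simp only [if_neg h0', if_neg h1', if_neg h0, if_neg h1, List.append_assoc]
        simp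

-- ===== VERDICT (by name: the statement is the Claim_ definition above) =====
theorem clamp_coords_spec : Claim_equal_clamp_coords := by
  intro coords img_size stride _ hpre
  rcases hpre with hpos | hnil
  · unfold Spec_clamp_coords
    set s : Nat := stride.toNat with hsdef
    have hseq : stride = (s : Int) := by omega
    have hs : 1 ≤ s := by omega
    have hA := portA_eq img_size.1 img_size.2 stride s hseq hs coords 0 []
    have hB := altLoop_eq coords img_size.1 img_size.2 s hs (coords.length + 1) 0 []
      (Nat.zero_mod s) (by omega)
    simp only [Nat.cast_zero, List.nil_append, List.drop_zero] at hA hB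
    simp only [clamp_coords, clamp_coords_alt]
    rw [hA, hseq, hB]
  · subst hnil
    simp [Spec_clamp_coords, clamp_coords, clamp_coords_alt, altLoop, PySem.List.enumerate_nil]
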